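-- pv_equiv track=rewrite | github.com/Lukyyyy19/Python | GuiaIntegradora/EjerciciosIntegradores.py | stock_productos
-- ===== SOURCE A (Python) =====
-- def stock_productos(stock_cambios:list[tuple[str,int]])->dict[str,tuple[int,int]]:
--     res:dict[str,tuple[int,int]] = dict()
--     #primero relleno res con las claves
--     for nombre,stock in stock_cambios:
--         if(not nombre in res.keys()):
--             res[nombre] = (stock,stock)
--     for nombre,stock in stock_cambios:
--         min:int = res[nombre][0]
--         max:int = res[nombre][1]
--         if(stock<min):
--             res[nombre] = (stock,max)
--         elif(stock>max):
--             res[nombre] = (min,stock)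
--     return res
-- ===== SOURCE B (Python) =====
-- def stock_productos(stock_cambios: list[tuple[str, int]]) -> dict[str, tuple[int, int]]:
--     grupos: dict[str, list[int]] = {}
--     for nombre, stock in stock_cambios:
--         grupos.setdefault(nombre, []).append(stock)
--     return {nombre: (min(vals), max(vals)) for nombre, vals in grupos.items()}
-- ===== Notes on version B (the rewrite author's own statement) =====
-- stated objective: idiomatic
-- what changed: Replaces A's two passes over the input (seed each key with its first value, then incrementally widen the (min,max) pair) with a collect-then-reduce shape: one grouping pass into a dict of value lists, then min()/max() builtins per key.
import Mathlib
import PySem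

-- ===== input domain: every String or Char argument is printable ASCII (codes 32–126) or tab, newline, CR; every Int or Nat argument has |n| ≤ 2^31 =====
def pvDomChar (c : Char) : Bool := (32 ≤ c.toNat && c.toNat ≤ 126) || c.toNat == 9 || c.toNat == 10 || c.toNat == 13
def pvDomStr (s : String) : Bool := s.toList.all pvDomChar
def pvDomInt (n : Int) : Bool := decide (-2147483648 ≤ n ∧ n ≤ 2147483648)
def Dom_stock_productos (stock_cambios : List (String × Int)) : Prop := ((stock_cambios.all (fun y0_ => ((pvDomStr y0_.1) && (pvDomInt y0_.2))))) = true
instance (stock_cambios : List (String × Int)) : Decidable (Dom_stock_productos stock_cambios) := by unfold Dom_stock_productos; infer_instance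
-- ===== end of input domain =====

-- B: collect-then-reduce — one grouping pass into a dict of value lists, then min/max per key (idiomatic), instead of A's seed-then-widen two-pass tuple maintenance.


-- ===== PORT A =====
-- first loop body: seed each unseen key with (stock, stock)
def pvStepA1 (d : PySem.Dict String (Int × Int)) (p : String × Int) : PySem.Dict String (Int × Int) :=
  if d.contains p.1 then d else d.insert p.1 (p.2, p.2)

-- second loop body: res[nombre] is always present (seeded by the first loop); the none branch is unreachable
def pvStepA2 (d : PySem.Dict String (Int × Int)) (p : String × Int) : PySem.Dict String (Int × Int) :=
  match d.get? p.1 with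
  | some (mn, mx) =>
      if p.2 < mn then d.insert p.1 (p.2, mx)
      else if p.2 > mx then d.insert p.1 (mn, p.2)
      else d
  | none => d

def stock_productos (stock_cambios : List (String × Int)) : List (String × Int × Int) :=
  let res1 := stock_cambios.foldl pvStepA1 PySem.Dict.empty
  let res2 := stock_cambios.foldl pvStepA2 res1
  res2.items

-- ===== PORT B =====
-- min(vals)/max(vals): vals is always nonempty where B calls it; (0,0) is the never-reached empty case
def pvMinMax (vs : List Int) : Int × Int :=
  match PySem.List.min? vs (fun x => x), PySem.List.max? vs (fun x => x) with
  | some a, some b => (a, b)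
  | _, _ => (0, 0)

def stock_productos_alt (stock_cambios : List (String × Int)) : List (String × Int × Int) :=
  let grupos := stock_cambios.foldl
    (fun d p => d.modify p.1 [] (fun vs => vs ++ [p.2])) PySem.Dict.empty
  -- dict comprehension over grupos' distinct keys, returned as the association list
  grupos.items.map (fun p => (p.1, pvMinMax p.2))

-- ===== PRECONDITION & SPEC =====
def Spec_stock_productos (stock_cambios : List (String × Int)) (out : List (String × Int × Int)) : Prop := out = stock_productos_alt stock_cambios
instance (stock_cambios : List (String × Int)) (out : List (String × Int × Int)) : Decidable (Spec_stock_productos stock_cambios out) := by unfold Spec_stock_productos; infer_instance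

-- ===== CLAIM (what is proved, stated in full; the proofs are below) =====
def Claim_equal_stock_productos : Prop := ∀ (stock_cambios : List (String × Int)), Dom_stock_productos stock_cambios → Spec_stock_productos stock_cambios (stock_productos stock_cambios)

-- ===== LEMMAS AND PROOFS =====
-- the values of key n in l, in order (the shape getD_foldl_modify_append produces)
def pvVals (n : String) (l : List (String × Int)) : List Int :=
  (l.filter (fun p => p.1 == n)).map (·.2)

theorem pvVals_cons (n m : String) (s : Int) (t : List (String × Int)) :
    pvVals n ((m, s) :: t) = if m = n then s :: pvVals n t else pvVals n t := by
  by_cases h : m = n <;> simp [pvVals, h]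

theorem pvVals_ne_nil (n : String) (l : List (String × Int)) (h : n ∈ l.map Prod.fst) :
    pvVals n l ≠ [] := by
  obtain ⟨p, hp, hn⟩ := List.mem_map.1 h
  have : p.2 ∈ pvVals n l := by
    refine List.mem_map.2 ⟨p, ?_, rfl⟩
    exact List.mem_filter.2 ⟨hp, by simp [hn]⟩
  exact fun hnil => by simp [hnil] at this

-- keys of A's first loop: the distinct keys of l in first-appearance order (after d's)
theorem keysA1 (l : List (String × Int)) (d : PySem.Dict String (Int × Int)) :
    (l.foldl pvStepA1 d).keys = PySem.Set.update d.keys (l.map Prod.fst) := by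
  induction l generalizing d with
  | nil => simp [PySem.Set.update_nil]
  | cons p t ih =>
      rw [List.foldl_cons, ih, List.map_cons, PySem.Set.update_cons]
      congr 1
      by_cases h : d.contains p.1 = true
      · have hm : p.1 ∈ d.keys := (PySem.Dict.contains_iff_mem_keys _ _).1 h
        simp [pvStepA1, h, PySem.Set.add_of_mem hm]
      · have hm : p.1 ∉ d.keys := fun hh => h ((PySem.Dict.contains_iff_mem_keys _ _).2 hh)
        have h' : d.contains p.1 = false := by simpa using h
        simp [pvStepA1, h', PySem.Set.add_of_not_mem hm,
          PySem.Dict.keys_insert_of_not_contains d _ h']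

theorem nodupA1 (l : List (String × Int)) (d : PySem.Dict String (Int × Int))
    (h : d.keys.Nodup) : (l.foldl pvStepA1 d).keys.Nodup := by
  induction l generalizing d with
  | nil => exact h
  | cons p t ih =>
      rw [List.foldl_cons]
      apply ih
      by_cases hc : d.contains p.1 = true
      · simpa [pvStepA1, hc]
      · have hc' : d.contains p.1 = false := by simpa using hc
        simpa [pvStepA1, hc'] using PySem.Dict.nodup_keys_insert _ _ _ h

-- once a key is seeded, the rest of the first loop never touches it
theorem getA1_stable (l : List (String × Int)) (d : PySem.Dict String (Int × Int))
    (n : String) (v : Int × Int) (hv : d.get? n = some v) :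
    (l.foldl pvStepA1 d).get? n = some v := by
  induction l generalizing d with
  | nil => simpa using hv
  | cons p t ih =>
      rw [List.foldl_cons]
      apply ih
      by_cases hq : n = p.1
      · have : d.contains p.1 = true := by
          rw [← hq, PySem.Dict.contains_eq_isSome_get?, hv]; rfl
        simpa [pvStepA1, this] using hv
      · by_cases hc : d.contains p.1 = true
        · simpa [pvStepA1, hc] using hv
        · have hc' : d.contains p.1 = false := by simpa using hc
          rw [pvStepA1]
          simp only [hc', Bool.false_eq_true, if_false]
          rw [PySem.Dict.get?_insert_of_ne d _ hq]
          exact hv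

-- value after A's first loop: the key's first value, doubled
theorem getA1 (l : List (String × Int)) (d : PySem.Dict String (Int × Int)) (n : String)
    (h : d.contains n = false) :
    (l.foldl pvStepA1 d).get? n = (pvVals n l).head?.map (fun v => (v, v)) := by
  induction l generalizing d with
  | nil => simp [(PySem.Dict.get?_eq_none_iff_contains d n).2 h, pvVals]
  | cons p t ih =>
      rw [List.foldl_cons]
      by_cases he : p.1 = n
      · have hc : d.contains p.1 = false := he ▸ h
        rw [pvStepA1]
        simp only [hc, Bool.false_eq_true, if_false]
        have := getA1_stable t (d.insert p.1 (p.2, p.2)) n (p.2, p.2)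
          (he ▸ PySem.Dict.get?_insert_self d p.1 (p.2, p.2))
        rw [this]
        obtain ⟨m, s⟩ := p
        simp only at he
        subst he
        rw [pvVals_cons]
        simp
      · have hvals : pvVals n ((p.1, p.2) :: t) = pvVals n t := by
          rw [pvVals_cons, if_neg he]
        rw [show p = (p.1, p.2) from rfl] at *
        rw [hvals]
        by_cases hc : d.contains p.1 = true
        · rw [pvStepA1]; simp only [hc, if_true]; exact ih d h
        · have hc' : d.contains p.1 = false := by simpa using hc
          rw [pvStepA1]
          simp only [hc', Bool.false_eq_true, if_false]
          apply ih
          rw [PySem.Dict.contains_insert]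
          simp [h, show (n == p.1) = false from by simpa using fun hh => he hh.symm]

-- the second loop never changes the key list
theorem keysA2 (l : List (String × Int)) (d : PySem.Dict String (Int × Int)) :
    (l.foldl pvStepA2 d).keys = d.keys := by
  induction l generalizing d with
  | nil => rfl
  | cons p t ih =>
      rw [List.foldl_cons, ih]
      rw [pvStepA2]
      cases hg : d.get? p.1 with
      | none => rfl
      | some v =>
          obtain ⟨mn, mx⟩ := v
          have hc : d.contains p.1 = true := by
            rw [PySem.Dict.contains_eq_isSome_get?, hg]; rfl
          by_cases h1 : p.2 < mn
          · simpa [h1] using PySem.Dict.keys_insert_of_contains d _ hc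
          · by_cases h2 : p.2 > mx
            · simpa [h1, h2] using PySem.Dict.keys_insert_of_contains d _ hc
            · simp [h1, h2]

-- the exact widening step A applies per matching value
def pvUpd (q : Int × Int) (s : Int) : Int × Int :=
  if s < q.1 then (s, q.2) else if s > q.2 then (q.1, s) else q

-- value after A's second loop: fold of the widening step over the key's values
theorem getA2 (l : List (String × Int)) (d : PySem.Dict String (Int × Int)) (n : String)
    (q : Int × Int) (hv : d.get? n = some q) :
    (l.foldl pvStepA2 d).get? n = some ((pvVals n l).foldl pvUpd q) := by
  induction l generalizing d q with
  | nil => simpa [pvVals] using hv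
  | cons p t ih =>
      rw [List.foldl_cons]
      obtain ⟨m, s⟩ := p
      by_cases he : m = n
      · subst he
        rw [pvVals_cons, if_pos rfl, List.foldl_cons]
        rw [pvStepA2]
        simp only [hv]
        obtain ⟨a, b⟩ := q
        rw [pvUpd]
        by_cases h1 : s < a
        · simp only [h1, if_true]
          exact ih _ _ (PySem.Dict.get?_insert_self d m (s, b))
        · by_cases h2 : s > b
          · simp only [h1, if_false, h2, if_true]
            exact ih _ _ (PySem.Dict.get?_insert_self d m (a, s))
          · simp only [h1, h2, if_false]
            exact ih _ _ hv
      · rw [pvVals_cons, if_neg he]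
        rw [pvStepA2]
        cases hg : d.get? m with
        | none => exact ih _ _ hv
        | some w =>
            obtain ⟨mn, mx⟩ := w
            by_cases h1 : s < mn
            · simp only [h1, if_true]
              exact ih _ _ (by rw [PySem.Dict.get?_insert_of_ne d _ (fun hh => he hh.symm)]; exact hv)
            · by_cases h2 : s > mx
              · simp only [h1, if_false, h2, if_true]
                exact ih _ _ (by rw [PySem.Dict.get?_insert_of_ne d _ (fun hh => he hh.symm)]; exact hv)
              · simp only [h1, h2, if_false]
                exact ih _ _ hv

-- the widening fold IS the (running min, running max) pair
theorem updFold (vs : List Int) (a b : Int) (h : a ≤ b) :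
    vs.foldl pvUpd (a, b) = (vs.foldl min a, vs.foldl max b) := by
  induction vs generalizing a b with
  | nil => rfl
  | cons s t ih =>
      rw [List.foldl_cons, List.foldl_cons, List.foldl_cons, pvUpd]
      by_cases h1 : s < a
      · simp only [h1, if_true]
        rw [min_eq_right (le_of_lt h1), max_eq_left (le_trans (le_of_lt h1) h)]
        exact ih _ _ (le_trans (le_of_lt h1) h)
      · by_cases h2 : s > b
        · simp only [h1, if_false, h2, if_true]
          rw [min_eq_left (le_trans h (le_of_lt h2)), max_eq_right (le_of_lt h2)]
          exact ih _ _ (le_trans h (le_of_lt h2))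
        · simp only [h1, h2, if_false]
          rw [min_eq_left (le_of_not_gt (by simpa using h1)), max_eq_left (le_of_not_gt h2)]
          exact ih _ _ h

theorem pvMinMax_cons (v : Int) (vs : List Int) :
    pvMinMax (v :: vs) = (vs.foldl min v, vs.foldl max v) := by
  rw [pvMinMax, PySem.List.min?_id_cons, PySem.List.max?_id_cons]

-- ===== VERDICT (by name: the statement is the Claim_ definition above) =====
theorem stock_productos_spec : Claim_equal_stock_productos := by
  intro l _
  unfold Spec_stock_productos stock_productos stock_productos_alt
  simp only []
  -- B's side
  have hgk : (l.foldl (fun d p => d.modify p.1 [] (fun vs => vs ++ [p.2]))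
      (PySem.Dict.empty : PySem.Dict String (List Int))).keys
      = PySem.Set.ofList (l.map Prod.fst) := by
    rw [PySem.Dict.keys_foldl_modify_key l Prod.fst [] (fun _ p => fun vs => vs ++ [p.2]),
      PySem.Dict.keys_empty, PySem.Set.update_nil_left]
  have hgn : (l.foldl (fun d p => d.modify p.1 [] (fun vs => vs ++ [p.2]))
      (PySem.Dict.empty : PySem.Dict String (List Int))).keys.Nodup := by
    exact PySem.Dict.nodup_keys_foldl_modify_key l Prod.fst [] (fun _ p => fun vs => vs ++ [p.2]) _ (by simp)
  rw [PySem.Dict.items_eq_map_keys _ hgn []]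
  -- A's side
  have hak : (l.foldl pvStepA2 (l.foldl pvStepA1 PySem.Dict.empty)).keys
      = PySem.Set.ofList (l.map Prod.fst) := by
    rw [keysA2, keysA1, PySem.Dict.keys_empty, PySem.Set.update_nil_left]
  have han : (l.foldl pvStepA2 (l.foldl pvStepA1 PySem.Dict.empty)).keys.Nodup := by
    rw [keysA2]; exact nodupA1 l _ (by simp)
  rw [PySem.Dict.items_eq_map_keys _ han ((0 : Int), (0 : Int))]
  rw [hak, hgk, List.map_map]
  apply List.map_congr_left
  intro n hn
  have hn' : n ∈ l.map Prod.fst := (PySem.Set.mem_ofList _ _).1 hn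
  obtain ⟨v, vs, hvv⟩ := List.exists_cons_of_ne_nil (pvVals_ne_nil n l hn')
  -- A's value at n
  have h1 : (l.foldl pvStepA1 PySem.Dict.empty).get? n = some (v, v) := by
    rw [getA1 l _ n (by simp), hvv]; rfl
  have h2 : (l.foldl pvStepA2 (l.foldl pvStepA1 PySem.Dict.empty)).get? n
      = some (vs.foldl min v, vs.foldl max v) := by
    rw [getA2 l _ n (v, v) h1, hvv, List.foldl_cons,
      show pvUpd (v, v) v = (v, v) from by simp [pvUpd], updFold vs v v le_rfl]
  -- B's value at n
  have h3 : (l.foldl (fun d p => d.modify p.1 [] (fun vs => vs ++ [p.2]))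
      (PySem.Dict.empty : PySem.Dict String (List Int))).getD n [] = pvVals n l := by
    rw [PySem.Dict.getD_foldl_modify_append l PySem.Dict.empty n]
    simp [pvVals]
  simp only [Function.comp]
  rw [PySem.Dict.getD_eq_get?_getD, h2, h3, hvv, pvMinMax_cons]
  rfl
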